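-- pv_equiv track=rewrite | github.com/hadipourh/faultyaes | ParallelKeyRecovery.py | find_delta_candidates
-- ===== SOURCE A (Python) =====
-- def find_delta_candidates(D0, Dj, number_of_faults):
--     lambda_prime = len(Dj)
--     lambda_prime_zero = len(D0)
--     final_candidates = []
--     for k in range(lambda_prime_zero - number_of_faults + 1): # Iterating up to this number ensures a non-empty output
--         candidates = []
--         delta_counters = dict()
--         for ell in range(lambda_prime):
--             alpha_l = D0[k] ^ Dj[ell]
--             delta_counters[alpha_l] = 1
--             Dtemp = set(Dj).difference(set([Dj[ell]]))
--             D0_complement = [d for d in D0 if d != D0[k]]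
--             for d in D0_complement:
--                 E = d ^ alpha_l
--                 if E in Dtemp:
--                     delta_counters[alpha_l] += 1
--                     Dtemp = Dtemp.difference(set([E]))
--         candidates = [delta for delta in delta_counters.keys() if delta_counters[delta] >= number_of_faults]
--         final_candidates.extend(candidates)
--         final_candidates = list(set(final_candidates))
--     return final_candidates
-- ===== SOURCE B (Python) =====
-- def find_delta_candidates(D0, Dj, number_of_faults):
--     # One pass over distinct(D0) x distinct(Dj) builds a XOR pair-count table;
--     # the per-k candidate counts are exactly these pair counts.
--     S0 = list(dict.fromkeys(D0))
--     Sj = list(dict.fromkeys(Dj))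
--     pair_counts = {}
--     for u in S0:
--         for w in Sj:
--             x = u ^ w
--             pair_counts[x] = pair_counts.get(x, 0) + 1
--     final_candidates = []
--     for k in range(len(D0) - number_of_faults + 1):
--         cands = [D0[k] ^ w for w in Sj if pair_counts[D0[k] ^ w] >= number_of_faults]
--         final_candidates.extend(cands)
--         final_candidates = list(set(final_candidates))
--     return final_candidates
-- ===== Notes on version B (the rewrite author's own statement) =====
-- stated objective: faster
-- what changed: A recomputes, for every window start k and every Dj element, a greedy rematching of D0-complement against a shrinking copy of set(Dj) (O(len(D0)^2*len(Dj)) plus per-ell set rebuilds); B builds one XOR pair-count dictionary over distinct(D0) x distinct(Dj) in a single pass and then just filters each k's candidate alphas by table lookup.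
import Mathlib
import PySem

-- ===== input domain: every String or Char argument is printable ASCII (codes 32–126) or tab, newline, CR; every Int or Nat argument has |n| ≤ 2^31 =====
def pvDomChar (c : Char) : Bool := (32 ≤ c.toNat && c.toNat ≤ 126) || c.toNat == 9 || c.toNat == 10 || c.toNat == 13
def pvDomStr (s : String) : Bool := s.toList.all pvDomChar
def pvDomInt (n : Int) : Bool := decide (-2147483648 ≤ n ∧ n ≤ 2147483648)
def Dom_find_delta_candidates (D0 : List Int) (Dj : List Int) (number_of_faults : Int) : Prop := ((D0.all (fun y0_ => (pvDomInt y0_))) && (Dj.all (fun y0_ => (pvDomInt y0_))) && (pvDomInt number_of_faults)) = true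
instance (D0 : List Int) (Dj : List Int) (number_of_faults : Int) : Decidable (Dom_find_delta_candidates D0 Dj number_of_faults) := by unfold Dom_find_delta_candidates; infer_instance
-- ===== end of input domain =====

-- B replaces A's per-k greedy rematching (O(λ0²·λ')) by one XOR pair-count table over the
-- distinct elements of D0 × Dj, then filters per k; equal candidate lists, proved below.
-- list(set(...)) is ported as PySem.Set.ofList (the return value is compared as a set).

-- ===== PORT A =====
-- inner loop body: 'for d in D0_complement: E = d ^ alpha; if E in Dtemp: counter += 1; Dtemp -= {E}'
def fdcInner (alpha : Int) (st : PySem.Dict Int Int × PySem.Set Int) (d : Int) : PySem.Dict Int Int × PySem.Set Int :=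
  let E := PySem.Int.bxor d alpha
  if PySem.Set.contains st.2 E then
    -- delta_counters[alpha_l] += 1 : the key alpha is always present here, so modify is exact
    (st.1.modify alpha 0 (· + 1), PySem.Set.diff st.2 (PySem.Set.ofList [E]))
  else st

-- body of 'for ell in range(lambda_prime)', taking the value v = Dj[ell]
def fdcEll (D0 : List Int) (Dj : List Int) (k : Int) (dc : PySem.Dict Int Int) (v : Int) : PySem.Dict Int Int :=
  let alpha_l := PySem.Int.bxor (PySem.List.pyGetD D0 k 0) v
  let dc := dc.insert alpha_l 1
  let Dtemp := PySem.Set.diff (PySem.Set.ofList Dj) (PySem.Set.ofList [v])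
  let D0_complement := D0.filter (fun d => d != PySem.List.pyGetD D0 k 0)
  (D0_complement.foldl (fdcInner alpha_l) (dc, Dtemp)).1

def find_delta_candidates (D0 : List Int) (Dj : List Int) (number_of_faults : Int) : List Int :=
  let lambda_prime := PySem.List.len Dj
  let lambda_prime_zero := PySem.List.len D0
  (PySem.List.pyRange 0 (lambda_prime_zero - number_of_faults + 1) 1).foldl (fun final_candidates k =>
    let delta_counters :=
      (PySem.List.pyRange 0 lambda_prime 1).foldl
        (fun dc ell => fdcEll D0 Dj k dc (PySem.List.pyGetD Dj ell 0)) PySem.Dict.empty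
    -- delta_counters[delta] with delta drawn from keys() is always present, so getD is exact
    let candidates := delta_counters.keys.filter
      (fun delta => decide (delta_counters.getD delta 0 ≥ number_of_faults))
    PySem.Set.ofList (final_candidates ++ candidates)) []

-- ===== PORT B =====
-- pair_counts[x] = pair_counts.get(x, 0) + 1  over distinct(D0) × distinct(Dj)
def fdcAltCounts (S0 : List Int) (Sj : List Int) : PySem.Dict Int Int :=
  S0.foldl (fun C u =>
    Sj.foldl (fun (C : PySem.Dict Int Int) w => C.modify (PySem.Int.bxor u w) 0 (· + 1)) C)
    PySem.Dict.empty

def find_delta_candidates_alt (D0 : List Int) (Dj : List Int) (number_of_faults : Int) : List Int :=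
  let S0 := PySem.List.dedup D0
  let Sj := PySem.List.dedup Dj
  let pair_counts := fdcAltCounts S0 Sj
  (PySem.List.pyRange 0 (PySem.List.len D0 - number_of_faults + 1) 1).foldl (fun final_candidates k =>
    -- pair_counts[D0[k] ^ w] is always a present key, so getD is exact
    let cands := (Sj.filter (fun w =>
        decide (pair_counts.getD (PySem.Int.bxor (PySem.List.pyGetD D0 k 0) w) 0 ≥ number_of_faults))).map
      (fun w => PySem.Int.bxor (PySem.List.pyGetD D0 k 0) w)
    PySem.Set.ofList (final_candidates ++ cands)) []

-- ===== PRECONDITION & SPEC =====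
-- Pre_ excludes exactly the inputs where A raises IndexError (D0[k] with k ≥ len(D0)):
-- when Dj is nonempty and number_of_faults < 1 the k-loop runs past the end of D0.  (B raises there too.)
def Pre_find_delta_candidates (D0 : List Int) (Dj : List Int) (number_of_faults : Int) : Prop :=
  Dj = [] ∨ 1 ≤ number_of_faults
instance (D0 : List Int) (Dj : List Int) (number_of_faults : Int) : Decidable (Pre_find_delta_candidates D0 Dj number_of_faults) := by unfold Pre_find_delta_candidates; infer_instance
def pvWitness_find_delta_candidates : List Int × List Int × Int := ([1, 2, 3, 258], [5, 6, 7, 262], 2)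
def Spec_find_delta_candidates (D0 : List Int) (Dj : List Int) (number_of_faults : Int) (out : List Int) : Prop := out = find_delta_candidates_alt D0 Dj number_of_faults
instance (D0 : List Int) (Dj : List Int) (number_of_faults : Int) (out : List Int) : Decidable (Spec_find_delta_candidates D0 Dj number_of_faults out) := by unfold Spec_find_delta_candidates; infer_instance

-- ===== CLAIM (what is proved, stated in full; the proofs are below) =====
def Claim_equal_find_delta_candidates : Prop := ∀ (D0 : List Int) (Dj : List Int) (number_of_faults : Int), Dom_find_delta_candidates D0 Dj number_of_faults → Pre_find_delta_candidates D0 Dj number_of_faults → Spec_find_delta_candidates D0 Dj number_of_faults (find_delta_candidates D0 Dj number_of_faults)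

-- ===== LEMMAS AND PROOFS =====

-- xor facts
theorem pv_bxor_invol (a b : Int) : PySem.Int.bxor a (PySem.Int.bxor a b) = b := by
  unfold PySem.Int.bxor
  by_cases ha : 0 ≤ a <;> by_cases hb : 0 ≤ b
  · simp [ha, hb]
  · have h1 : ¬ (0:Int) ≤ -↑(a.toNat ^^^ (-b - 1).toNat) - 1 := by omega
    simp only [ha, hb, if_true, if_false, h1]
    have : (-(-↑(a.toNat ^^^ (-b - 1).toNat) - 1) - 1 : Int).toNat = a.toNat ^^^ (-b - 1).toNat := by omega
    rw [this, Nat.xor_xor_cancel_left]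
    omega
  · have h1 : ¬ (0:Int) ≤ -↑((-a - 1).toNat ^^^ b.toNat) - 1 := by omega
    simp only [ha, hb, if_true, if_false, h1]
    have : (-(-↑((-a - 1).toNat ^^^ b.toNat) - 1) - 1 : Int).toNat = (-a - 1).toNat ^^^ b.toNat := by omega
    rw [this, Nat.xor_xor_cancel_left]
    omega
  · have h1 : (0:Int) ≤ ↑((-a - 1).toNat ^^^ (-b - 1).toNat) := by positivity
    simp only [ha, hb, if_true, if_false, h1]
    rw [Int.toNat_natCast, Nat.xor_xor_cancel_left]
    omega

theorem pv_bxor_comm (a b : Int) : PySem.Int.bxor a b = PySem.Int.bxor b a := by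
  unfold PySem.Int.bxor
  split_ifs <;> simp [Nat.xor_comm]

theorem pv_bxor_back (e x : Int) : PySem.Int.bxor (PySem.Int.bxor e x) x = e := by
  rw [pv_bxor_comm e x, pv_bxor_comm _ x]
  exact pv_bxor_invol x e

theorem pv_bxor_left_inj (a : Int) : Function.Injective (fun x => PySem.Int.bxor a x) := by
  intro x y h
  have := congrArg (fun z => PySem.Int.bxor a z) h
  simpa [pv_bxor_invol] using this

-- counting helpers on Nodup lists
theorem pv_countP_congr_not_mem (T : List Int) (E : Int) (p : Int → Bool) (hE : E ∉ T) :
    T.countP (fun e => (e == E) || p e) = T.countP p := by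
  apply List.countP_congr
  intro x hx
  have : x ≠ E := fun h => hE (h ▸ hx)
  simp [this]

theorem pv_countP_split (T : List Int) (E : Int) (p : Int → Bool) (hnd : T.Nodup) (hE : E ∈ T) :
    T.countP (fun e => (e == E) || p e) = 1 + (T.filter (fun e => !(e == E))).countP p := by
  induction T with
  | nil => cases hE
  | cons t T ih =>
    rcases List.nodup_cons.mp hnd with ⟨htT, hndT⟩
    rcases List.mem_cons.mp hE with rfl | hE'
    · simp only [List.countP_cons, List.filter_cons, BEq.rfl, Bool.true_or, Bool.not_true]
      rw [pv_countP_congr_not_mem T E p htT]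
      have hf : T.filter (fun e => !(e == E)) = T := by
        apply List.filter_eq_self.mpr
        intro x hx
        simp only [Bool.not_eq_true', beq_eq_false_iff_ne]
        exact fun h => htT (h ▸ hx)
      simp [hf]
      omega
    · have htE : (t == E) = false := by simp; exact fun h => htT (h ▸ hE')
      simp only [List.countP_cons, List.filter_cons, htE, Bool.false_or, Bool.not_false, if_pos]
      rw [ih hndT hE']
      omega

-- the value A's ell-loop stores at key alpha (it depends only on the key, not on which ell wrote it)
def fdcVal (D0 : List Int) (Dj : List Int) (a0 : Int) (alpha : Int) : Int :=
  1 + (((PySem.Set.ofList Dj).filter (fun e => !(e == PySem.Int.bxor a0 alpha))).countP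
        (fun e => ((D0.filter (fun d => d != a0)).map (fun d => PySem.Int.bxor d alpha)).contains e) : Int)

-- inner-loop invariant (A's greedy matching): the alpha-counter gains the number of
-- elements of T hit by {d ^ alpha : d in ds}; other keys and the key list are unchanged.
theorem pv_inner (alpha : Int) (ds : List Int) (dc : PySem.Dict Int Int) (T : PySem.Set Int)
    (hnd : T.Nodup) (hc : dc.contains alpha = true) :
    (ds.foldl (fdcInner alpha) (dc, T)).1.getD alpha 0
        = dc.getD alpha 0 + (T.countP (fun e => (ds.map (fun d => PySem.Int.bxor d alpha)).contains e) : Int)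
      ∧ (∀ β, β ≠ alpha → (ds.foldl (fdcInner alpha) (dc, T)).1.getD β 0 = dc.getD β 0)
      ∧ (ds.foldl (fdcInner alpha) (dc, T)).1.keys = dc.keys := by
  induction ds generalizing dc T with
  | nil => simp
  | cons d ds ih =>
    simp only [List.foldl_cons, List.map_cons]
    by_cases hmem : PySem.Set.contains T (PySem.Int.bxor d alpha) = true
    · have hET : PySem.Int.bxor d alpha ∈ T := List.contains_iff_mem.mp hmem
      have hstep : fdcInner alpha (dc, T) d
          = (dc.modify alpha 0 (· + 1), PySem.Set.diff T (PySem.Set.ofList [PySem.Int.bxor d alpha])) := by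
        simp [fdcInner]
        intro hx; exact absurd hET hx
      rw [hstep]
      have hdiff : PySem.Set.diff T (PySem.Set.ofList [PySem.Int.bxor d alpha])
          = T.filter (fun e => !(e == PySem.Int.bxor d alpha)) := by
        simp only [PySem.Set.diff]
        apply List.filter_congr
        intro x hx
        simp [PySem.Set.ofList, PySem.Set.add, PySem.Set.contains, PySem.Set.empty]
        rfl
      have hT' : (PySem.Set.diff T (PySem.Set.ofList [PySem.Int.bxor d alpha])).Nodup := by
        rw [hdiff]; exact List.Nodup.filter _ hnd
      have hc' : (dc.modify alpha 0 (· + 1)).contains alpha = true := by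
        rw [PySem.Dict.contains_modify]; simp
      obtain ⟨h1, h2, h3⟩ := ih (dc.modify alpha 0 (· + 1)) _ hT' hc'
      have hcount := pv_countP_split T (PySem.Int.bxor d alpha)
        (fun e => (ds.map (fun d => PySem.Int.bxor d alpha)).contains e) hnd hET
      refine ⟨?_, ?_, ?_⟩
      · rw [h1, PySem.Dict.getD_modify_self, hdiff]
        simp only [List.contains_cons]
        rw [hcount]
        push_cast
        ring
      · intro β hβ
        rw [h2 β hβ, PySem.Dict.getD_modify_of_ne _ _ _ hβ]
      · rw [h3, PySem.Dict.keys_modify, PySem.Dict.keys_insert_of_contains _ _ hc]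
    · have hET : PySem.Int.bxor d alpha ∉ T := fun hx => hmem (List.contains_iff_mem.mpr hx)
      have hstep : fdcInner alpha (dc, T) d = (dc, T) := by
        simp [fdcInner]
        intro hx; exact absurd hx hET
      rw [hstep]
      obtain ⟨h1, h2, h3⟩ := ih dc T hnd hc
      refine ⟨?_, h2, h3⟩
      rw [h1]
      simp only [List.contains_cons]
      rw [pv_countP_congr_not_mem T _ _ hET]

-- small Dict/Set bridges
theorem pv_keys_insert_eq_add (dc : PySem.Dict Int Int) (k : Int) (v : Int) :
    (dc.insert k v).keys = PySem.Set.add dc.keys k := by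
  by_cases h : dc.contains k = true
  · have hk : k ∈ dc.keys := by rw [PySem.Dict.contains_eq_decide_mem_keys] at h; simpa using h
    rw [PySem.Dict.keys_insert_of_contains _ _ h]
    simp [PySem.Set.add, PySem.Set.contains, hk]
  · have hk : k ∉ dc.keys := by rw [PySem.Dict.contains_eq_decide_mem_keys] at h; simpa using h
    rw [PySem.Dict.keys_insert_of_not_contains _ _ (by simpa using h)]
    simp [PySem.Set.add, PySem.Set.contains, hk]

theorem pv_nodup_add (s : PySem.Set Int) (x : Int) (h : s.Nodup) : (PySem.Set.add s x).Nodup := by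
  by_cases hx : x ∈ s
  · simpa [PySem.Set.add, PySem.Set.contains, List.contains_iff_mem, hx] using h
  · simp only [PySem.Set.add, PySem.Set.contains, List.contains_iff_mem]
    rw [if_neg (by simpa using hx)]
    exact List.Nodup.append h (List.nodup_singleton x) (List.disjoint_singleton.mpr hx)

theorem pv_diff_singleton (T : PySem.Set Int) (v : Int) :
    PySem.Set.diff T (PySem.Set.ofList [v]) = T.filter (fun e => !(e == v)) := by
  simp only [PySem.Set.diff]
  apply List.filter_congr
  intro x hx
  simp [PySem.Set.ofList, PySem.Set.add, PySem.Set.contains, PySem.Set.empty]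
  rfl

-- ell-loop invariant: keys are the alphas in first-occurrence order, each holding fdcVal
theorem pv_ell (D0 : List Int) (Dj : List Int) (k : Int) (vs : List Int) (dc : PySem.Dict Int Int)
    (hnd : dc.keys.Nodup) :
    (vs.foldl (fdcEll D0 Dj k) dc).keys
        = PySem.Set.update dc.keys (vs.map (fun v => PySem.Int.bxor (PySem.List.pyGetD D0 k 0) v))
      ∧ ∀ α, (vs.foldl (fdcEll D0 Dj k) dc).getD α 0
        = if α ∈ vs.map (fun v => PySem.Int.bxor (PySem.List.pyGetD D0 k 0) v)
          then fdcVal D0 Dj (PySem.List.pyGetD D0 k 0) α else dc.getD α 0 := by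
  induction vs generalizing dc with
  | nil => simp [PySem.Set.update]
  | cons v vs ih =>
    set a0 := PySem.List.pyGetD D0 k 0 with ha0
    set α0 := PySem.Int.bxor a0 v with hα0
    have hvback : PySem.Int.bxor a0 α0 = v := pv_bxor_invol a0 v
    have hT0 : (PySem.Set.diff (PySem.Set.ofList Dj) (PySem.Set.ofList [v])).Nodup := by
      rw [pv_diff_singleton]
      exact List.Nodup.filter _ (PySem.Set.nodup_ofList Dj)
    obtain ⟨i1, i2, i3⟩ := pv_inner α0 (D0.filter (fun d => d != a0)) (dc.insert α0 1)
      (PySem.Set.diff (PySem.Set.ofList Dj) (PySem.Set.ofList [v])) hT0 (PySem.Dict.contains_insert_self dc α0 1)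
    have hstep : fdcEll D0 Dj k dc v
        = ((D0.filter (fun d => d != a0)).foldl (fdcInner α0)
            (dc.insert α0 1, PySem.Set.diff (PySem.Set.ofList Dj) (PySem.Set.ofList [v]))).1 := rfl
    have hkeys' : (fdcEll D0 Dj k dc v).keys = PySem.Set.add dc.keys α0 := by
      rw [hstep, i3, pv_keys_insert_eq_add]
    have hval : (fdcEll D0 Dj k dc v).getD α0 0 = fdcVal D0 Dj a0 α0 := by
      rw [hstep, i1, PySem.Dict.getD_insert_self]
      unfold fdcVal
      rw [hvback, pv_diff_singleton]
    have hother : ∀ β, β ≠ α0 → (fdcEll D0 Dj k dc v).getD β 0 = dc.getD β 0 := by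
      intro β hβ
      rw [hstep, i2 β hβ, PySem.Dict.getD_insert_of_ne _ _ _ hβ]
    have hnd' : (fdcEll D0 Dj k dc v).keys.Nodup := by
      rw [hkeys']; exact pv_nodup_add _ _ hnd
    obtain ⟨k1, k2⟩ := ih (fdcEll D0 Dj k dc v) hnd'
    constructor
    · rw [List.foldl_cons, k1, hkeys', List.map_cons]
      rfl
    · intro α
      rw [List.foldl_cons, k2 α, List.map_cons]
      by_cases hmem : α ∈ vs.map (fun v => PySem.Int.bxor a0 v)
      · rw [if_pos hmem, if_pos (List.mem_cons_of_mem _ hmem)]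
      · rw [if_neg hmem]
        by_cases hα : α = α0
        · subst hα
          rw [hval, if_pos (List.mem_cons_self ..)]
        · rw [hother α hα, if_neg]
          intro hc
          rcases List.mem_cons.mp hc with h | h
          · exact hα h
          · exact hmem h

-- B's table is the XOR pair count over the distinct elements
theorem pv_counts_aux (Sj : List Int) (hnd : Sj.Nodup) (S0 : List Int) (x : Int) :
    ∀ d : PySem.Dict Int Int,
    (S0.foldl (fun C u =>
      Sj.foldl (fun (C : PySem.Dict Int Int) w => C.modify (PySem.Int.bxor u w) 0 (· + 1)) C) d).getD x 0
      = d.getD x 0 + (S0.countP (fun u => Sj.contains (PySem.Int.bxor u x)) : Int) := by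
  induction S0 with
  | nil => simp
  | cons u S0 ih =>
    intro d
    rw [List.foldl_cons, ih, List.countP_cons]
    have hinner : (Sj.foldl (fun (C : PySem.Dict Int Int) w => C.modify (PySem.Int.bxor u w) 0 (· + 1)) d).getD x 0
        = d.getD x 0 + ((Sj.map (fun w => PySem.Int.bxor u w)).count x : Int) := by
      rw [show (Sj.foldl (fun (C : PySem.Dict Int Int) w => C.modify (PySem.Int.bxor u w) 0 (· + 1)) d)
          = ((Sj.map (fun w => PySem.Int.bxor u w)).foldl
              (fun (C : PySem.Dict Int Int) y => C.modify y 0 (· + 1)) d) from (List.foldl_map (f := fun w => PySem.Int.bxor u w)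
            (g := fun (C : PySem.Dict Int Int) y => C.modify y 0 (· + 1))).symm]
      exact PySem.Dict.getD_foldl_modify_add_one _ d x
    rw [hinner]
    have hcnt : (Sj.map (fun w => PySem.Int.bxor u w)).count x
        = if Sj.contains (PySem.Int.bxor u x) then 1 else 0 := by
      by_cases hm : PySem.Int.bxor u x ∈ Sj
      · rw [if_pos (List.contains_iff_mem.mpr hm)]
        apply List.count_eq_one_of_mem
        · exact (List.nodup_map_iff_inj_on hnd).mpr (fun a _ b _ h => pv_bxor_left_inj u h)
        · exact List.mem_map.mpr ⟨_, hm, pv_bxor_invol u x⟩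
      · rw [if_neg (fun hc => hm (List.contains_iff_mem.mp hc))]
        apply List.count_eq_zero_of_not_mem
        intro hc
        rcases List.mem_map.mp hc with ⟨w, hw, hwx⟩
        exact hm (by rw [← hwx, pv_bxor_invol]; exact hw)
    rw [hcnt]
    by_cases hb : Sj.contains (PySem.Int.bxor u x) = true
    · rw [if_pos hb]
      push_cast
      ring
    · rw [if_neg hb]
      push_cast
      ring

theorem pv_counts (S0 : List Int) (Sj : List Int) (x : Int) (hnd : Sj.Nodup) :
    (fdcAltCounts S0 Sj).getD x 0
      = (S0.countP (fun u => Sj.contains (PySem.Int.bxor u x)) : Int) := by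
  unfold fdcAltCounts
  rw [pv_counts_aux Sj hnd S0 x PySem.Dict.empty]
  simp

-- set image under the injective map (bxor a0 .)
theorem pv_ofList_map_aux (a0 : Int) (l : List Int) : ∀ s : PySem.Set Int,
    (l.map (fun v => PySem.Int.bxor a0 v)).foldl PySem.Set.add (s.map (fun v => PySem.Int.bxor a0 v))
      = (l.foldl PySem.Set.add s).map (fun v => PySem.Int.bxor a0 v) := by
  induction l with
  | nil => simp
  | cons x l ih =>
    intro s
    rw [List.map_cons, List.foldl_cons, List.foldl_cons]
    have hadd : PySem.Set.add (s.map (fun v => PySem.Int.bxor a0 v)) (PySem.Int.bxor a0 x)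
        = (PySem.Set.add s x).map (fun v => PySem.Int.bxor a0 v) := by
      by_cases hm : x ∈ s
      · have h1 : PySem.Int.bxor a0 x ∈ s.map (fun v => PySem.Int.bxor a0 v) := List.mem_map.mpr ⟨x, hm, rfl⟩
        simp only [PySem.Set.add, PySem.Set.contains]
        rw [if_pos (List.contains_iff_mem.mpr h1), if_pos (List.contains_iff_mem.mpr hm)]
      · have h1 : PySem.Int.bxor a0 x ∉ s.map (fun v => PySem.Int.bxor a0 v) := by
          intro hc
          rcases List.mem_map.mp hc with ⟨y, hy, hyx⟩
          exact hm (pv_bxor_left_inj a0 hyx ▸ hy)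
        simp only [PySem.Set.add, PySem.Set.contains]
        rw [if_neg (fun hc => h1 (List.contains_iff_mem.mp hc)),
            if_neg (fun hc => hm (List.contains_iff_mem.mp hc))]
        simp
    rw [hadd, ih]

theorem pv_ofList_map (a0 : Int) (l : List Int) :
    PySem.Set.ofList (l.map (fun v => PySem.Int.bxor a0 v))
      = (PySem.Set.ofList l).map (fun v => PySem.Int.bxor a0 v) := by
  have := pv_ofList_map_aux a0 l PySem.Set.empty
  simpa [PySem.Set.ofList, PySem.Set.empty] using this

-- the symmetric count swap
theorem pv_countP_swap (alpha : Int) (A B : List Int) (hA : A.Nodup) (hB : B.Nodup) :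
    A.countP (fun e => B.contains (PySem.Int.bxor e alpha))
      = B.countP (fun u => A.contains (PySem.Int.bxor u alpha)) := by
  rw [List.countP_eq_length_filter, List.countP_eq_length_filter]
  have hmap : ((A.filter (fun e => B.contains (PySem.Int.bxor e alpha))).map (fun e => PySem.Int.bxor e alpha)).length
      = (A.filter (fun e => B.contains (PySem.Int.bxor e alpha))).length := List.length_map ..
  rw [← hmap]
  set L1 := (A.filter (fun e => B.contains (PySem.Int.bxor e alpha))).map (fun e => PySem.Int.bxor e alpha) with hL1
  set L2 := B.filter (fun u => A.contains (PySem.Int.bxor u alpha)) with hL2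
  have hnd1 : L1.Nodup := by
    apply (List.nodup_map_iff_inj_on (List.Nodup.filter _ hA)).mpr
    intro a _ b _ h
    rw [pv_bxor_comm a alpha, pv_bxor_comm b alpha] at h
    exact pv_bxor_left_inj alpha h
  have hnd2 : L2.Nodup := List.Nodup.filter _ hB
  have hmem : ∀ x, x ∈ L1 ↔ x ∈ L2 := by
    intro x
    rw [hL1, hL2]
    simp only [List.mem_map, List.mem_filter]
    constructor
    · rintro ⟨e, ⟨heA, heB⟩, rfl⟩
      refine ⟨List.contains_iff_mem.mp heB, ?_⟩
      apply List.contains_iff_mem.mpr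
      rwa [pv_bxor_comm e alpha, pv_bxor_comm _ alpha, pv_bxor_invol]
    · rintro ⟨hxB, hxA⟩
      refine ⟨PySem.Int.bxor x alpha, ⟨List.contains_iff_mem.mp hxA, ?_⟩, ?_⟩
      · apply List.contains_iff_mem.mpr
        rwa [pv_bxor_comm _ alpha, pv_bxor_comm x alpha, pv_bxor_invol]
      · rw [pv_bxor_comm _ alpha, pv_bxor_comm x alpha, pv_bxor_invol]
  rw [← List.toFinset_card_of_nodup hnd1, ← List.toFinset_card_of_nodup hnd2]
  congr 1
  ext x
  simp only [List.mem_toFinset]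
  exact hmem x

-- A's stored count equals B's table entry, for every key alpha the ell-loop creates
theorem pv_val_eq (D0 : List Int) (Dj : List Int) (a0 : Int) (w : Int)
    (ha0 : a0 ∈ D0) (hw : w ∈ Dj) :
    fdcVal D0 Dj a0 (PySem.Int.bxor a0 w)
      = (fdcAltCounts (PySem.List.dedup D0) (PySem.List.dedup Dj)).getD (PySem.Int.bxor a0 w) 0 := by
  set α := PySem.Int.bxor a0 w with hα
  have hwα : PySem.Int.bxor a0 α = w := pv_bxor_invol a0 w
  have hwa : PySem.Int.bxor w α = a0 := by
    rw [hα, pv_bxor_comm a0 w]; exact pv_bxor_invol w a0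
  rw [PySem.List.dedup_eq_ofList, PySem.List.dedup_eq_ofList,
      pv_counts _ _ _ (PySem.Set.nodup_ofList Dj)]
  unfold fdcVal
  rw [hwα, List.countP_filter]
  have hpt : (PySem.Set.ofList Dj).countP
        (fun e => ((D0.filter (fun d => d != a0)).map (fun d => PySem.Int.bxor d α)).contains e && !(e == w))
      = (PySem.Set.ofList Dj).countP
        (fun e => List.contains (PySem.Set.ofList D0) (PySem.Int.bxor e α) && !(e == w)) := by
    apply List.countP_congr
    intro e _
    by_cases hew : e = w
    · have h2 : (e == w) = true := by simpa using hew
      simp [h2]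
    · have h2 : (e == w) = false := by simpa using hew
      simp only [h2, Bool.not_false, Bool.and_true]
      constructor
      · intro h
        rcases List.mem_map.mp (List.contains_iff_mem.mp h) with ⟨d, hd, rfl⟩
        apply List.contains_iff_mem.mpr
        rw [pv_bxor_back]
        exact (PySem.Set.mem_ofList D0 d).mpr (List.mem_filter.mp hd).1
      · intro h
        apply List.contains_iff_mem.mpr
        apply List.mem_map.mpr
        have hm : PySem.Int.bxor e α ∈ D0 :=
          (PySem.Set.mem_ofList D0 _).mp (List.contains_iff_mem.mp h)
        refine ⟨PySem.Int.bxor e α, List.mem_filter.mpr ⟨hm, ?_⟩, pv_bxor_back e α⟩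
        apply bne_iff_ne.mpr
        intro hc
        exact hew (by rw [← hwα, ← hc, pv_bxor_back])
  rw [hpt]
  have hsplit := pv_countP_split (PySem.Set.ofList Dj) w
      (fun e => List.contains (PySem.Set.ofList D0) (PySem.Int.bxor e α))
      (PySem.Set.nodup_ofList Dj) ((PySem.Set.mem_ofList Dj w).mpr hw)
  rw [List.countP_filter] at hsplit
  have hcongr : (PySem.Set.ofList Dj).countP
        (fun e => (e == w) || List.contains (PySem.Set.ofList D0) (PySem.Int.bxor e α))
      = (PySem.Set.ofList Dj).countP
        (fun e => List.contains (PySem.Set.ofList D0) (PySem.Int.bxor e α)) := by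
    apply List.countP_congr
    intro e _
    by_cases hew : e = w
    · subst hew
      rw [hwa]
      simp [(PySem.Set.mem_ofList D0 a0).mpr ha0]
    · simp [hew]
  have hswap := pv_countP_swap α (PySem.Set.ofList Dj) (PySem.Set.ofList D0)
      (PySem.Set.nodup_ofList Dj) (PySem.Set.nodup_ofList D0)
  rw [← hswap, ← hcongr, hsplit]
  push_cast
  ring

-- per-iteration equality of the candidate lists
theorem pv_cands_eq (D0 : List Int) (Dj : List Int) (number_of_faults : Int) (k : Int)
    (hpre : Pre_find_delta_candidates D0 Dj number_of_faults)
    (hk0 : 0 ≤ k) (hk1 : k < PySem.List.len D0 - number_of_faults + 1) :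
    (let delta_counters :=
      (PySem.List.pyRange 0 (PySem.List.len Dj) 1).foldl
        (fun dc ell => fdcEll D0 Dj k dc (PySem.List.pyGetD Dj ell 0)) PySem.Dict.empty
     delta_counters.keys.filter
      (fun delta => decide (delta_counters.getD delta 0 ≥ number_of_faults)))
    = ((PySem.List.dedup Dj).filter (fun w =>
        decide ((fdcAltCounts (PySem.List.dedup D0) (PySem.List.dedup Dj)).getD
          (PySem.Int.bxor (PySem.List.pyGetD D0 k 0) w) 0 ≥ number_of_faults))).map
      (fun w => PySem.Int.bxor (PySem.List.pyGetD D0 k 0) w) := by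
  change ((PySem.List.pyRange 0 (PySem.List.len Dj) 1).foldl
        (fun dc ell => fdcEll D0 Dj k dc (PySem.List.pyGetD Dj ell 0)) PySem.Dict.empty).keys.filter
      (fun delta => decide (((PySem.List.pyRange 0 (PySem.List.len Dj) 1).foldl
        (fun dc ell => fdcEll D0 Dj k dc (PySem.List.pyGetD Dj ell 0)) PySem.Dict.empty).getD delta 0
        ≥ number_of_faults)) = _
  rcases List.eq_nil_or_concat' Dj with hDj | ⟨_, _, _⟩
  case inl =>
    subst hDj
    simp [PySem.List.len, PySem.List.pyRange_one_eq_nil, PySem.List.dedup]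
  case inr h =>
    have hne : Dj ≠ [] := by rintro rfl; simp at h
    have hnf : 1 ≤ number_of_faults := by
      rcases hpre with h' | h'
      · exact absurd h' hne
      · exact h'
    have hlen : PySem.List.len D0 = (D0.length : Int) := PySem.List.len_eq D0
    have hkrange : PySem.Raise.InRange D0.length k := by
      constructor
      · omega
      · rw [hlen] at hk1; omega
    have ha0 : PySem.List.pyGetD D0 k 0 ∈ D0 := PySem.List.pyGetD_mem D0 0 hkrange
    have hfold : (PySem.List.pyRange 0 (PySem.List.len Dj) 1).foldl
        (fun dc ell => fdcEll D0 Dj k dc (PySem.List.pyGetD Dj ell 0)) PySem.Dict.empty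
        = Dj.foldl (fdcEll D0 Dj k) PySem.Dict.empty := by
      rw [PySem.List.len_eq]
      exact PySem.List.foldl_pyRange_zero_pyGetD' Dj 0 (fdcEll D0 Dj k) PySem.Dict.empty
    simp only [hfold]
    obtain ⟨hkeys, hvals⟩ := pv_ell D0 Dj k Dj PySem.Dict.empty (by simp [PySem.Dict.keys_empty])
    rw [hkeys, PySem.Dict.keys_empty, PySem.Set.update_nil_left, pv_ofList_map]
    rw [List.filter_map]
    rw [PySem.List.dedup_eq_ofList, PySem.List.dedup_eq_ofList]
    congr 1
    apply List.filter_congr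
    intro w hw
    have hwDj : w ∈ Dj := (PySem.Set.mem_ofList Dj w).mp hw
    have hmem : PySem.Int.bxor (PySem.List.pyGetD D0 k 0) w
        ∈ Dj.map (fun v => PySem.Int.bxor (PySem.List.pyGetD D0 k 0) v) :=
      List.mem_map.mpr ⟨w, hwDj, rfl⟩
    simp only [Function.comp]
    rw [hvals, if_pos hmem]
    rw [show fdcVal D0 Dj (PySem.List.pyGetD D0 k 0) (PySem.Int.bxor (PySem.List.pyGetD D0 k 0) w)
        = (fdcAltCounts (PySem.List.dedup D0) (PySem.List.dedup Dj)).getD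
            (PySem.Int.bxor (PySem.List.pyGetD D0 k 0) w) 0 from pv_val_eq D0 Dj _ w ha0 hwDj]
    rw [PySem.List.dedup_eq_ofList, PySem.List.dedup_eq_ofList]

-- ===== VERDICT (by name: the statement is the Claim_ definition above) =====
theorem find_delta_candidates_spec : Claim_equal_find_delta_candidates := by
  intro D0 Dj number_of_faults _hdom hpre
  unfold Spec_find_delta_candidates find_delta_candidates find_delta_candidates_alt
  refine PySem.List.foldl_congr_mem _ _ _ _ ?_
  intro acc k hk
  rw [PySem.List.mem_pyRange_one] at hk
  have h := pv_cands_eq D0 Dj number_of_faults k hpre hk.1 hk.2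
  simp only at h ⊢
  rw [h]
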